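-- pv_equiv track=rewrite | github.com/ImGeuntae/CodingTest | 프로그래머스/2/131704. 택배상자/택배상자.py | solution
-- ===== SOURCE A (Python) =====
-- def solution(order):
--     belt = list(range(len(order),0,-1))
--     deque = []
--     i = 0
--     while i<len(order):
--         if belt and order[i] == belt[-1]:
--             belt.pop()
--             i += 1
--         elif deque and order[i] == deque[-1]:
--             deque.pop()
--             i += 1
--         else:
--             if belt:
--                 deque.append(belt.pop())
--             else:
--                 return i
--     return i
-- ===== SOURCE B (Python) =====
-- def largest_untaken(taken, m):
--     j = m
--     while j > 0 and taken[j]: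
--         j -= 1
--     return j
--
--
-- def solution(order):
--     n = len(order)
--     taken = [False] * (n + 1)  # taken[j]: box j already delivered
--     m = 0                      # highest box number delivered from the belt so far
--     for i, x in enumerate(order):
--         if m < x <= n:
--             # x comes fresh off the belt; boxes m+1..x-1 stay behind, untaken
--             taken[x] = True
--             m = x
--         elif 1 <= x <= m and largest_untaken(taken, m) == x:
--             # x must be the largest not-yet-delivered box below m (the only
--             # one reachable from the side); deliver it
--             taken[x] = True
--         else:
--             return i
--     return n
-- ===== Notes on version B (the rewrite author's own statement) =====
-- stated objective: alternative
-- what changed: B removes both of A's stacks: it tracks only the highest belt box delivered so far (m) and a boolean taken[] array, accepting x either as a fresh belt box (m < x <= n) or as the largest not-yet-taken box below m (found by a downward scan), instead of A's belt/deque push-pop simulation.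
import Mathlib
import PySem

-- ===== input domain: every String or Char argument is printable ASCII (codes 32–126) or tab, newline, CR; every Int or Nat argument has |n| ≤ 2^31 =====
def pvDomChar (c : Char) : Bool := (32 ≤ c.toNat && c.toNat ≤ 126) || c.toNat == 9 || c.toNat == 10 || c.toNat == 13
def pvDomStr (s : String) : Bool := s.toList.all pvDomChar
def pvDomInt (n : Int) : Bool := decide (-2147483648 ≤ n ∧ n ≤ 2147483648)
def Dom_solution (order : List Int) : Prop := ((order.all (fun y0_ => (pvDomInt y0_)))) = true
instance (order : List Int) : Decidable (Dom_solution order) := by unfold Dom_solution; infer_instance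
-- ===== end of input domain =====

-- B replaces A's two-stack simulation by a stackless scheme: a boolean "taken" array plus the
-- highest belt box delivered so far; equally fast, no stack state (objective: alternative).

-- ===== PORT A =====
-- Stacks are represented with the TOP at the HEAD of the list, so Python's
-- belt = list(range(len(order),0,-1)) (top = last = 1) is the list [1,2,…,n] = intsFromA 1 n.
def intsFromA (b n : Nat) : List Int :=
  if b ≤ n then (b : Int) :: intsFromA (b + 1) n else []
termination_by n + 1 - b

-- the while-loop of A, state (belt, deque, i); fuel is only a totality guard:
-- each iteration strictly decreases 2*belt.length + dq.length + (order.length - i),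
-- so the fuel `solution` supplies is never exhausted (proved in solLoopA_fuel below)
def solLoopA (order : List Int) (fuel : Nat) (belt dq : List Int) (i : Nat) : Int :=
  match fuel with
  | 0 => (i : Int)
  | fuel + 1 =>
    if h : i < order.length then
      match belt with
      | b :: bs =>
        if order[i]'h = b then solLoopA order fuel bs dq (i + 1)
        else
          match dq with
          | d :: ds =>
            if order[i]'h = d then solLoopA order fuel (b :: bs) ds (i + 1)
            else solLoopA order fuel bs (b :: d :: ds) i
          | [] => solLoopA order fuel bs [b] i
      | [] =>
        match dq with
        | d :: ds => if order[i]'h = d then solLoopA order fuel [] ds (i + 1) else (i : Int)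
        | [] => (i : Int)
    else (i : Int)

def solution (order : List Int) : Int :=
  solLoopA order (3 * order.length + 1) (intsFromA 1 order.length) [] 0

-- ===== PORT B =====
-- Source B's helper: j = m; while j > 0 and taken[j]: j -= 1; return j
-- (indices read are 1..m with m < len(taken) at every call, so getD is exact here)
def largestUntaken (taken : List Bool) (j : Nat) : Nat :=
  match j with
  | 0 => 0
  | k + 1 => if taken.getD (k + 1) false then largestUntaken taken k else k + 1

-- the for-loop of Source B over enumerate(order); state (taken, m), rest = order[i:]
-- (taken[x] = True writes use x.toNat: both branches guarantee 1 ≤ x, so toNat is exact)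
def solLoopB (order rest : List Int) (i : Nat) (taken : List Bool) (m : Nat) : Int :=
  match rest with
  | [] => (order.length : Int)
  | x :: rs =>
    if (m : Int) < x ∧ x ≤ (order.length : Int) then
      solLoopB order rs (i + 1) (taken.set x.toNat true) x.toNat
    else if 1 ≤ x ∧ x ≤ (m : Int) ∧ (largestUntaken taken m : Int) = x then
      solLoopB order rs (i + 1) (taken.set x.toNat true) m
    else (i : Int)

def solution_alt (order : List Int) : Int :=
  solLoopB order order 0 (List.replicate (order.length + 1) false) 0

-- ===== PRECONDITION & SPEC =====
def Spec_solution (order : List Int) (out : Int) : Prop := out = solution_alt order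
instance (order : List Int) (out : Int) : Decidable (Spec_solution order out) := by unfold Spec_solution; infer_instance

-- ===== CLAIM (what is proved, stated in full; the proofs are below) =====
def Claim_equal_solution : Prop := ∀ (order : List Int), Dom_solution order → Spec_solution order (solution order)

-- ===== LEMMAS AND PROOFS =====

-- the strictly decreasing measure of A's while loop
def measA (order belt dq : List Int) (i : Nat) : Nat :=
  2 * belt.length + dq.length + (order.length - i)

-- any fuel above the measure gives the same result: the loop terminates before fuel runs out
lemma solLoopA_fuel (order : List Int) (f1 f2 : Nat) (belt dq : List Int) (i : Nat)
    (h1 : measA order belt dq i < f1) (h2 : measA order belt dq i < f2) :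
    solLoopA order f1 belt dq i = solLoopA order f2 belt dq i := by
  induction f1 generalizing f2 belt dq i with
  | zero => omega
  | succ g1 ih =>
    cases f2 with
    | zero => omega
    | succ g2 =>
      rw [solLoopA]
      conv_rhs => rw [solLoopA]
      by_cases h : i < order.length
      · simp only [dif_pos h]
        cases belt with
        | nil =>
          cases dq with
          | nil => rfl
          | cons d ds =>
            by_cases hd : order[i]'h = d
            · simp only [hd, if_pos rfl]
              exact ih g2 [] ds (i + 1) (by simp [measA] at h1 ⊢; omega) (by simp [measA] at h2 ⊢; omega)
            · simp [hd]
        | cons b bs =>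
          by_cases hb : order[i]'h = b
          · simp only [hb, if_pos rfl]
            exact ih g2 bs dq (i + 1) (by simp [measA] at h1 ⊢; omega) (by simp [measA] at h2 ⊢; omega)
          · simp only [if_neg hb]
            cases dq with
            | nil =>
              exact ih g2 bs [b] i (by simp [measA] at h1 ⊢; omega) (by simp [measA] at h2 ⊢; omega)
            | cons d ds =>
              by_cases hd : order[i]'h = d
              · simp only [hd, if_pos rfl]
                exact ih g2 (b :: bs) ds (i + 1) (by simp [measA] at h1 ⊢; omega) (by simp [measA] at h2 ⊢; omega)
              · simp only [if_neg hd]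
                exact ih g2 bs (b :: d :: ds) i (by simp [measA] at h1 ⊢; omega) (by simp [measA] at h2 ⊢; omega)
      · simp [h]

-- proof-side runner: solLoopA with just enough fuel
def runA (order belt dq : List Int) (i : Nat) : Int :=
  solLoopA order (measA order belt dq i + 1) belt dq i

lemma runA_stop (order belt dq : List Int) (i : Nat) (h : ¬ i < order.length) :
    runA order belt dq i = (i : Int) := by
  unfold runA; rw [solLoopA]; simp [h]

lemma runA_popbelt (order : List Int) (b : Int) (bs dq : List Int) (i : Nat)
    (h : i < order.length) (hb : order[i]'h = b) :
    runA order (b :: bs) dq i = runA order bs dq (i + 1) := by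
  unfold runA
  rw [solLoopA]
  simp only [dif_pos h, if_pos hb]
  exact solLoopA_fuel order (measA order (b :: bs) dq i) (measA order bs dq (i + 1) + 1)
    bs dq (i + 1) (by simp [measA]; omega) (by omega)

lemma runA_popdq (order : List Int) (b : Int) (bs : List Int) (d : Int) (ds : List Int) (i : Nat)
    (h : i < order.length) (hb : ¬ order[i]'h = b) (hd : order[i]'h = d) :
    runA order (b :: bs) (d :: ds) i = runA order (b :: bs) ds (i + 1) := by
  unfold runA
  rw [solLoopA]
  simp only [dif_pos h, if_neg hb, if_pos hd]
  exact solLoopA_fuel order (measA order (b :: bs) (d :: ds) i) (measA order (b :: bs) ds (i + 1) + 1)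
    (b :: bs) ds (i + 1) (by simp [measA]; omega) (by omega)

lemma runA_push (order : List Int) (b : Int) (bs : List Int) (d : Int) (ds : List Int) (i : Nat)
    (h : i < order.length) (hb : ¬ order[i]'h = b) (hd : ¬ order[i]'h = d) :
    runA order (b :: bs) (d :: ds) i = runA order bs (b :: d :: ds) i := by
  unfold runA
  rw [solLoopA]
  simp only [dif_pos h, if_neg hb, if_neg hd]
  exact solLoopA_fuel order (measA order (b :: bs) (d :: ds) i) (measA order bs (b :: d :: ds) i + 1)
    bs (b :: d :: ds) i (by simp [measA]; omega) (by omega)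

lemma runA_push_nil (order : List Int) (b : Int) (bs : List Int) (i : Nat)
    (h : i < order.length) (hb : ¬ order[i]'h = b) :
    runA order (b :: bs) [] i = runA order bs [b] i := by
  unfold runA
  rw [solLoopA]
  simp only [dif_pos h, if_neg hb]
  exact solLoopA_fuel order (measA order (b :: bs) [] i) (measA order bs [b] i + 1)
    bs [b] i (by simp [measA]; omega) (by omega)

lemma runA_nil_pop (order : List Int) (d : Int) (ds : List Int) (i : Nat)
    (h : i < order.length) (hd : order[i]'h = d) :
    runA order [] (d :: ds) i = runA order [] ds (i + 1) := by
  unfold runA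
  rw [solLoopA]
  simp only [dif_pos h, if_pos hd]
  exact solLoopA_fuel order (measA order [] (d :: ds) i) (measA order [] ds (i + 1) + 1)
    [] ds (i + 1) (by simp [measA]; omega) (by omega)

lemma runA_nil_ne (order : List Int) (d : Int) (ds : List Int) (i : Nat)
    (h : i < order.length) (hd : ¬ order[i]'h = d) :
    runA order [] (d :: ds) i = (i : Int) := by
  unfold runA; rw [solLoopA]; try simp [h, hd]

lemma runA_nil_nil (order : List Int) (i : Nat) (h : i < order.length) :
    runA order [] [] i = (i : Int) := by
  unfold runA; rw [solLoopA]; try simp [h]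

lemma intsFromA_length (b n : Nat) : (intsFromA b n).length = n + 1 - b := by
  induction hd : n + 1 - b generalizing b with
  | zero =>
    rw [intsFromA]; simp only [show ¬ b ≤ n by omega, if_false, List.length_nil]
    all_goals omega
  | succ k ih =>
    rw [intsFromA]; simp only [show b ≤ n by omega, if_true, List.length_cons]
    rw [ih (b + 1) (by omega)]
    all_goals omega

-- the untaken boxes in 1..m, largest first: this is exactly A's deque (top at head)
def udesc (taken : List Bool) : Nat → List Int
  | 0 => []
  | k + 1 => if taken.getD (k + 1) false then udesc taken k else ((k + 1 : Nat) : Int) :: udesc taken k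

lemma udesc_mem {taken : List Bool} {m : Nat} {y : Int} (hy : y ∈ udesc taken m) :
    1 ≤ y ∧ y ≤ (m : Nat) := by
  induction m with
  | zero => simp [udesc] at hy
  | succ k ih =>
    simp only [udesc] at hy
    split_ifs at hy with h
    · have := ih hy; push_cast at this ⊢; omega
    · rcases List.mem_cons.mp hy with he | hm
      · subst he; push_cast; omega
      · have := ih hm; push_cast at this ⊢; omega

lemma lu_eq (taken : List Bool) (m : Nat) :
    ((largestUntaken taken m : Nat) : Int) = (udesc taken m).headD 0 := by
  induction m with
  | zero => simp [largestUntaken, udesc]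
  | succ k ih =>
    simp only [largestUntaken, udesc]
    split_ifs with h
    · exact ih
    · simp

-- setting an index above m does not change udesc below m
lemma udesc_set_high (taken : List Bool) (m p : Nat) (hp : m < p) :
    udesc (taken.set p true) m = udesc taken m := by
  induction m with
  | zero => simp [udesc]
  | succ k ih =>
    have hne : p ≠ k + 1 := by omega
    simp only [udesc, List.getD, List.getElem?_set_ne hne, ih (by omega)]
    rfl

lemma intsFromA_snoc (b k : Nat) (h : b ≤ k + 1) :
    intsFromA b (k + 1) = intsFromA b k ++ [((k + 1 : Nat) : Int)] := by
  induction hd : k + 1 - b generalizing b with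
  | zero =>
    have hb : b = k + 1 := by omega
    subst hb
    conv_lhs => rw [intsFromA]
    simp only [le_refl, if_true]
    conv_lhs => rw [intsFromA]
    simp only [show ¬ (k + 1 + 1 ≤ k + 1) by omega, if_false]
    conv_rhs => rw [intsFromA]
    simp only [show ¬ (k + 1 ≤ k) by omega, if_false]
    simp
  | succ d ih =>
    have hbk : b ≤ k := by omega
    conv_lhs => rw [intsFromA]
    conv_rhs => rw [intsFromA]
    simp only [h, hbk, if_true]
    rw [ih (b + 1) (by omega) (by omega)]
    simp

-- after taking fresh box x off the belt, the untaken boxes below x are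
-- x-1,…,m+1 (newly passed over) on top of the old untaken boxes below m
lemma udesc_take_new (taken : List Bool) (m x : Nat)
    (hinv : ∀ j : Nat, taken.getD j false = true → j ≤ m)
    (hlen : x < taken.length) (hmx : m < x) :
    udesc (taken.set x true) (x - 1) = (intsFromA (m + 1) (x - 1)).reverse ++ udesc taken m := by
  have key : ∀ k : Nat, m ≤ k → k < x →
      udesc (taken.set x true) k = (intsFromA (m + 1) k).reverse ++ udesc taken m := by
    intro k
    induction k with
    | zero =>
      intro h1 h2
      have hm0 : m = 0 := by omega
      subst hm0
      rw [intsFromA]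
      simp [udesc]
    | succ k ih =>
      intro h1 h2
      by_cases hk : m ≤ k
      · have hne : x ≠ k + 1 := by omega
        have hfalse : taken.getD (k + 1) false = false := by
          cases h : taken.getD (k + 1) false with
          | false => rfl
          | true => exact absurd (hinv _ h) (by omega)
        simp only [udesc, List.getD, List.getElem?_set_ne hne]
        simp only [List.getD] at hfalse
        rw [hfalse]
        simp only [Bool.false_eq_true, if_false]
        rw [ih hk (by omega), intsFromA_snoc (m + 1) k (by omega)]
        simp
      · have hm : m = k + 1 := by omega
        rw [intsFromA]
        simp only [show ¬ (m + 1 ≤ k + 1) by omega, if_false, List.reverse_nil, List.nil_append]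
        rw [udesc_set_high taken (k + 1) x (by omega), hm]
  have hx1 : x - 1 < x := by omega
  by_cases hmx1 : m ≤ x - 1
  · exact key (x - 1) hmx1 hx1
  · -- m = x - 1 is forced when m < x; this case m > x - 1 is impossible
    omega

lemma udesc_pop (taken : List Bool) (m : Nat) (x : Int) (rest : List Int)
    (hlen : m < taken.length) (h : udesc taken m = x :: rest) :
    udesc (taken.set x.toNat true) m = rest := by
  induction m with
  | zero => simp [udesc] at h
  | succ k ih =>
    simp only [udesc] at h
    split_ifs at h with ht
    · have hx : x ∈ udesc taken k := by rw [h]; simp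
      have hb := udesc_mem hx
      have hne : x.toNat ≠ k + 1 := by omega
      simp only [udesc, List.getD, List.getElem?_set_ne hne]
      simp only [List.getD] at ht
      rw [ht]
      simp only [if_true]
      exact ih (by omega) h
    · have hx : x = ((k + 1 : Nat) : Int) := by
        have := congrArg (List.headD · 0) h; simpa using this.symm
      have hrest : rest = udesc taken k := by
        have := congrArg List.tail h; simpa using this.symm
      have hxt : x.toNat = k + 1 := by rw [hx]; simp
      have hget : (taken.set x.toNat true).getD (k + 1) false = true := by
        rw [hxt]
        simp only [List.getD, List.getElem?_set_self (by omega : k + 1 < taken.length)]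
        rfl
      simp only [udesc, hget, if_true]
      rw [hxt, udesc_set_high taken k (k + 1) (by omega), hrest]

-- A cannot deliver order[i]: it shuttles the whole belt onto the deque and returns i
lemma A_fail (order : List Int) (n b : Nat) (dq : List Int) (i : Nat) (h : i < order.length)
    (hbelt : ∀ j : Nat, b ≤ j → j ≤ n → ((j : Nat) : Int) ≠ order[i]'h)
    (hdq : ∀ (d : Int) (ds : List Int), dq = d :: ds → d ≠ order[i]'h) :
    runA order (intsFromA b n) dq i = (i : Int) := by
  induction hd : n + 1 - b generalizing b dq with
  | zero =>
    have hbn : ¬ b ≤ n := by omega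
    rw [intsFromA]
    simp only [hbn, if_false]
    cases dq with
    | nil => exact runA_nil_nil order i h
    | cons d ds =>
      exact runA_nil_ne order d ds i h (fun he => hdq d ds rfl he.symm)
  | succ k ih =>
    have hbn : b ≤ n := by omega
    rw [intsFromA]
    simp only [hbn, if_true]
    have hb : ¬ order[i]'h = ((b : Nat) : Int) := fun he => hbelt b le_rfl hbn he.symm
    cases dq with
    | nil =>
      rw [runA_push_nil order _ _ i h hb]
      exact ih (b + 1) [((b : Nat) : Int)]
        (fun j h1 h2 => hbelt j (by omega) h2)
        (fun d ds hds => by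
          have : d = ((b : Nat) : Int) := by simpa using congrArg (List.headD · 0) hds.symm
          subst this; exact fun he => hb he.symm)
        (by omega)
    | cons d ds =>
      have hd' : ¬ order[i]'h = d := fun he => hdq d ds rfl he.symm
      rw [runA_push order _ _ d ds i h hb hd']
      exact ih (b + 1) (((b : Nat) : Int) :: d :: ds)
        (fun j h1 h2 => hbelt j (by omega) h2)
        (fun e es hes => by
          have : e = ((b : Nat) : Int) := by simpa using congrArg (List.headD · 0) hes.symm
          subst this; exact fun he2 => hb he2.symm)
        (by omega)

-- A delivers fresh box x > m from the belt, shuttling m+1..x-1 onto the deque on the way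
lemma A_climb (order : List Int) (n b x : Nat) (dq : List Int) (i : Nat) (h : i < order.length)
    (hx : order[i]'h = ((x : Nat) : Int)) (hb1 : 1 ≤ b) (hbx : b ≤ x) (hxn : x ≤ n)
    (hdq : ∀ y ∈ dq, y < ((b : Nat) : Int)) :
    runA order (intsFromA b n) dq i
      = runA order (intsFromA (x + 1) n) ((intsFromA b (x - 1)).reverse ++ dq) (i + 1) := by
  induction hd : x - b generalizing b dq with
  | zero =>
    have hbe : b = x := by omega
    subst hbe
    rw [intsFromA]
    simp only [show b ≤ n from hxn, if_true]
    rw [runA_popbelt order _ _ dq i h hx]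
    have hempty : intsFromA b (b - 1) = [] := by
      rw [intsFromA]; simp only [show ¬ b ≤ b - 1 by omega, if_false]
    rw [hempty]
    rfl
  | succ k ih =>
    have hbn : b ≤ n := by omega
    have hne : ¬ order[i]'h = ((b : Nat) : Int) := by
      rw [hx]; intro he
      have hxb : x = b := by exact_mod_cast he
      omega
    rw [intsFromA]
    simp only [hbn, if_true]
    have step : runA order (((b : Nat) : Int) :: intsFromA (b + 1) n) dq i
        = runA order (intsFromA (b + 1) n) (((b : Nat) : Int) :: dq) i := by
      cases dq with
      | nil => exact runA_push_nil order _ _ i h hne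
      | cons d ds =>
        have hdne : ¬ order[i]'h = d := by
          intro he; have := hdq d (by simp); rw [← he, hx] at this
          have : x < b := by exact_mod_cast this
          omega
        exact runA_push order _ _ d ds i h hne hdne
    rw [step, ih (b + 1) (((b : Nat) : Int) :: dq) (by omega) (by omega)
      (fun y hy => by
        rcases List.mem_cons.mp hy with he | hm
        · subst he; push_cast; omega
        · have := hdq y hm; push_cast at this ⊢; omega)
      (by omega)]
    have hsplit : intsFromA b (x - 1) = ((b : Nat) : Int) :: intsFromA (b + 1) (x - 1) := by
      rw [intsFromA]; simp only [show b ≤ x - 1 by omega, if_true]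
    rw [hsplit]
    simp

-- MAIN INVARIANT: A with belt = [m+1,…,n] and deque = untaken boxes ≤ m agrees with B's loop
lemma main_lemma (order : List Int) (rest : List Int) (i : Nat) (taken : List Bool) (m : Nat)
    (hi : order.drop i = rest)
    (hil : i ≤ order.length)
    (hlen : taken.length = order.length + 1)
    (hm : m ≤ order.length)
    (hinv : ∀ j : Nat, taken.getD j false = true → j ≤ m) :
    runA order (intsFromA (m + 1) order.length) (udesc taken m) i
      = solLoopB order rest i taken m := by
  induction rest generalizing i taken m with
  | nil =>
    have hie : i = order.length := by
      have := congrArg List.length hi; simp at this; omega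
    rw [solLoopB]
    subst hie
    rw [runA_stop order _ _ _ (by omega)]
  | cons x rs ih =>
    have hlt : i < order.length := by
      by_contra hc
      have : order.drop i = [] := List.drop_eq_nil_of_le (by omega)
      rw [hi] at this; simp at this
    have hx : order[i]'hlt = x := by
      have h0 : order[i + 0]? = some x := by
        rw [← List.getElem?_drop, hi]; rfl
      rw [Nat.add_zero, List.getElem?_eq_getElem hlt] at h0
      exact Option.some.inj h0
    have hrs : order.drop (i + 1) = rs := by
      have := congrArg List.tail hi
      simpa [List.tail_drop] using this
    rw [solLoopB]
    by_cases c1 : (m : Int) < x ∧ x ≤ (order.length : Int)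
    · rw [if_pos c1]
      -- fresh box off the belt
      have hxpos : 0 < x := by have := c1.1; omega
      have hxnat : x = ((x.toNat : Nat) : Int) := by omega
      have hmx : m < x.toNat := by omega
      have hxn : x.toNat ≤ order.length := by omega
      rw [A_climb order order.length (m + 1) x.toNat (udesc taken m) i hlt (by rw [hx]; exact hxnat)
        (by omega) (by omega) hxn (fun y hy => by have := (udesc_mem hy).2; push_cast at this ⊢; omega)]
      rw [← udesc_take_new taken m x.toNat hinv (by omega) hmx]
      have hbelt : intsFromA (x.toNat + 1) order.length = intsFromA (x.toNat - 1 + 1 + 1) order.length := by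
        congr 1; omega
      have hud : udesc (taken.set x.toNat true) (x.toNat - 1)
          = udesc (taken.set x.toNat true) x.toNat := by
        have hget : (taken.set x.toNat true).getD x.toNat false = true := by
          simp only [List.getD, List.getElem?_set_self (by omega : x.toNat < taken.length)]
          rfl
        conv_rhs => rw [show x.toNat = (x.toNat - 1) + 1 by omega, udesc]
        rw [show (x.toNat - 1) + 1 = x.toNat by omega, hget]
        simp
      rw [hbelt, hud, show x.toNat - 1 + 1 = x.toNat by omega]
      exact ih (i + 1) (taken.set x.toNat true) x.toNat hrs (by omega) (by simp [hlen]) hxn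
        (fun j hj => by
          by_cases hje : j = x.toNat
          · omega
          · have : taken.getD j false = true := by
              simpa [List.getD, List.getElem?_set_ne (fun he => hje he.symm)] using hj
            have := hinv j this; omega)
    · rw [if_neg c1]
      by_cases c2 : 1 ≤ x ∧ x ≤ (m : Int) ∧ ((largestUntaken taken m : Nat) : Int) = x
      · rw [if_pos c2]
        -- x is the top of A's deque
        obtain ⟨hx1, hxm, hlu⟩ := c2
        have hhead : (udesc taken m).headD 0 = x := by rw [← lu_eq]; exact hlu
        cases hud : udesc taken m with
        | nil => rw [hud] at hhead; simp at hhead; omega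
        | cons d ds =>
          have hdx : x = d := by rw [hud] at hhead; simpa using hhead.symm
          subst hdx
          have hbelt_ne : ¬ (x = (m : Int) + 1) := by omega
          have hA : runA order (intsFromA (m + 1) order.length) (x :: ds) i
              = runA order (intsFromA (m + 1) order.length) ds (i + 1) := by
            rw [intsFromA]
            split_ifs with hb
            · exact runA_popdq order _ _ x ds i hlt (by rw [hx]; push_cast; exact hbelt_ne) hx
            · exact runA_nil_pop order x ds i hlt hx
          rw [hA, ← udesc_pop taken m x ds (by omega) hud]
          exact ih (i + 1) (taken.set x.toNat true) m hrs (by omega) (by simp [hlen]) hm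
            (fun j hj => by
              by_cases hje : j = x.toNat
              · omega
              · have : taken.getD j false = true := by
                  simpa [List.getD, List.getElem?_set_ne (fun he => hje he.symm)] using hj
                exact hinv j this)
      · rw [if_neg c2]
        -- no move possible: A shuttles the belt over and returns i
        apply A_fail order order.length (m + 1) (udesc taken m) i hlt
        · intro j h1 h2 he
          rw [hx] at he
          exact c1 ⟨by omega, by omega⟩
        · intro d ds hds he
          rw [hx] at he
          subst he
          have hb := udesc_mem (show d ∈ udesc taken m by rw [hds]; simp)
          apply c2
          refine ⟨hb.1, by have := hb.2; omega, ?_⟩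
          rw [lu_eq, hds]
          simp

-- ===== VERDICT (by name: the statement is the Claim_ definition above) =====
theorem solution_spec : Claim_equal_solution := by
  intro order _
  unfold Spec_solution solution solution_alt
  have hblen : (intsFromA 1 order.length).length = order.length := by
    rw [intsFromA_length]; omega
  have hfuel : solLoopA order (3 * order.length + 1) (intsFromA 1 order.length) [] 0
      = runA order (intsFromA 1 order.length) [] 0 := by
    unfold runA
    exact solLoopA_fuel order _ _ _ _ 0 (by simp [measA, hblen]; omega) (by omega)
  rw [hfuel]
  have := main_lemma order order 0 (List.replicate (order.length + 1) false) 0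
    (by simp) (by omega) (by simp) (by omega)
    (by
      intro j hj
      simp only [List.getD, List.getElem?_replicate] at hj
      split at hj <;> simp at hj)
  simpa [udesc] using this
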